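-- pv_equiv track=rewrite | github.com/AishwaryaMyilsamy/OCR- | model.py | extract_meter_info
-- ===== SOURCE A (Python) =====
-- from typing import Tuple
--
-- def extract_meter_info(text: str) -> Tuple[str, str]:
--     #Extract meter number and reading from text.
--     # Implement a simple regex or string parsing to find the meter number and reading
--     meter_number = ""
--     meter_reading = ""
--
--     # This example assumes meter numbers are numeric and have a fixed length (e.g., 10 digits)
--     lines = text.split('\n')
--     for line in lines:
--         # Extract meter number based on expected format
--         if len(line) >= 10 and line.isdigit():
--             meter_number = line
--         # Extract meter reading based on expected numeric format
--         if any(char.isdigit() for char in line):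
--             meter_reading = line
--
--     return meter_number, meter_reading
-- ===== SOURCE B (Python) =====
-- def extract_meter_info(text):
--     # Single character-level streaming scan: builds each line itself and keeps
--     # incremental per-line statistics (length, has-digit, all-digit), never
--     # materialising the list of lines that A's split('\n') loop walks over.
--     meter_number = ""
--     meter_reading = ""
--     buf = []
--     n = 0
--     has_digit = False
--     all_digit = True
--     for ch in text:
--         if ch == '\n':
--             if n >= 10 and all_digit:
--                 meter_number = ''.join(buf)
--             if has_digit:
--                 meter_reading = ''.join(buf)
--             buf = []
--             n = 0
--             has_digit = False
--             all_digit = True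
--         else:
--             buf.append(ch)
--             n += 1
--             d = ch.isdigit()
--             has_digit = has_digit or d
--             all_digit = all_digit and d
--     if n >= 10 and all_digit:
--         meter_number = ''.join(buf)
--     if has_digit:
--         meter_reading = ''.join(buf)
--     return meter_number, meter_reading
-- ===== Notes on version B (the rewrite author's own statement) =====
-- stated objective: alternative
-- what changed: Replaced A's split-into-a-list-of-lines plus a forward loop over that list with a single character-level streaming state machine that builds each line itself and maintains incremental per-line statistics (length, has-digit, all-digit), finalising a candidate at each line break and at end of text.
import Mathlib
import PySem

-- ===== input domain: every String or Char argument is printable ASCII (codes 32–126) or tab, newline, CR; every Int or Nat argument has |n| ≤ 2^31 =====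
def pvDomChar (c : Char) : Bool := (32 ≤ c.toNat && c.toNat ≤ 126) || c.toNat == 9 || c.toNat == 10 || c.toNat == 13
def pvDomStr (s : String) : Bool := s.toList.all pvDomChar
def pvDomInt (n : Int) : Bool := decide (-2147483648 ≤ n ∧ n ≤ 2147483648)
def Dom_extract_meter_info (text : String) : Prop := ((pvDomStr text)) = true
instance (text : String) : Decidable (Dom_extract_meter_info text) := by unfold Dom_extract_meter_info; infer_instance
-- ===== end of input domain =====

-- B replaces A's split('\n')-then-loop-over-lines pass by a single character-level
-- streaming state machine with incremental per-line statistics; objective: alternative.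

-- ===== PORT A =====
def extract_meter_info (text : String) : String × String :=
  let lines := (PySem.Str.split? text "\n").getD []
  lines.foldl (fun (st : String × String) line =>
    (if decide (10 ≤ PySem.Str.len line) && PySem.Str.strIsdigit line then line else st.1,
     if line.toList.any PySem.Chars.isdigit then line else st.2)) ("", "")

-- ===== PORT B =====
-- state = (buf, n, has_digit, all_digit, meter_number, meter_reading); the loop body of Source B
def emiChStep (st : List Char × Int × Bool × Bool × String × String) (ch : Char) :
    List Char × Int × Bool × Bool × String × String :=
  let (buf, n, hasd, alld, mn, mr) := st
  if ch = '\n' then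
    ([], 0, false, true,
     (if decide (10 ≤ n) && alld then String.ofList buf else mn),
     (if hasd then String.ofList buf else mr))
  else
    let d := PySem.Chars.isdigit ch
    (buf ++ [ch], n + 1, hasd || d, alld && d, mn, mr)

-- the final block of Source B (flushes the last, '\n'-less line)
def emiFinish (st : List Char × Int × Bool × Bool × String × String) : String × String :=
  let (buf, n, hasd, alld, mn, mr) := st
  ((if decide (10 ≤ n) && alld then String.ofList buf else mn),
   (if hasd then String.ofList buf else mr))

def extract_meter_info_alt (text : String) : String × String :=
  emiFinish (text.toList.foldl emiChStep ([], 0, false, true, "", ""))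

-- ===== PRECONDITION & SPEC =====
def Spec_extract_meter_info (text : String) (out : String × String) : Prop := out = extract_meter_info_alt text
instance (text : String) (out : String × String) : Decidable (Spec_extract_meter_info text out) := by unfold Spec_extract_meter_info; infer_instance

-- ===== CLAIM (what is proved, stated in full; the proofs are below) =====
def Claim_equal_extract_meter_info : Prop := ∀ (text : String), Dom_extract_meter_info text → Spec_extract_meter_info text (extract_meter_info text)

-- ===== LEMMAS AND PROOFS =====

-- the loop body of A, named for the proofs
def lineStep (st : String × String) (line : String) : String × String :=
  (if decide (10 ≤ PySem.Str.len line) && PySem.Str.strIsdigit line then line else st.1,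
   if line.toList.any PySem.Chars.isdigit then line else st.2)

theorem extract_eq_foldl (text : String) :
    extract_meter_info text = ((PySem.Str.split? text "\n").getD []).foldl lineStep ("", "") := rfl

-- reference splitter: text.split('\n') on the char level, by structural recursion
def splitNl : List Char → List (List Char)
  | [] => [[]]
  | c :: rest =>
    if c = '\n' then [] :: splitNl rest
    else
      match splitNl rest with
      | [] => [[c]]
      | h :: t => (c :: h) :: t

-- prepend chars onto the first piece
def hcons (x : List Char) : List (List Char) → List (List Char)
  | [] => [x]
  | h :: t => (x ++ h) :: t

theorem splitNl_ne_nil (l : List Char) : splitNl l ≠ [] := by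
  cases l with
  | nil => simp [splitNl]
  | cons c rest =>
    simp only [splitNl]
    split
    · simp
    · cases h : splitNl rest <;> simp

theorem hcons_nil (ls : List (List Char)) (h : ls ≠ []) : hcons [] ls = ls := by
  cases ls with
  | nil => exact absurd rfl h
  | cons a t => simp [hcons]

theorem hcons_shift (c : Char) (x l : List Char) (hc : ¬ c = '\n') :
    hcons x (splitNl (c :: l)) = hcons (x ++ [c]) (splitNl l) := by
  simp only [splitNl, if_neg hc]
  cases h : splitNl l with
  | nil => exact absurd h (splitNl_ne_nil l)
  | cons hd t => simp [hcons]

theorem go_eq (fuel : Nat) : ∀ (l cur : List Char) (acc : List (List Char)), l.length < fuel →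
    PySem.Chars.splitOn.go ['\n'] fuel l cur acc = acc.reverse ++ hcons cur.reverse (splitNl l) := by
  induction fuel with
  | zero => intro l cur acc h; exact absurd h (by omega)
  | succ f ih =>
    intro l cur acc h
    cases l with
    | nil => simp [PySem.Chars.splitOn.go, splitNl, hcons]
    | cons c rest =>
      by_cases hc : c = '\n'
      · subst hc
        have hstep : PySem.Chars.splitOn.go ['\n'] (f+1) ('\n'::rest) cur acc
            = PySem.Chars.splitOn.go ['\n'] f rest [] (cur.reverse :: acc) := by
          simp [PySem.Chars.splitOn.go, List.isPrefixOf]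
        rw [hstep, ih rest [] _ (by simpa using h)]
        simp only [List.reverse_nil]
        rw [hcons_nil _ (splitNl_ne_nil rest)]
        simp [splitNl, hcons]
      · have hstep : PySem.Chars.splitOn.go ['\n'] (f+1) (c::rest) cur acc
            = PySem.Chars.splitOn.go ['\n'] f rest (c :: cur) acc := by
          simp [PySem.Chars.splitOn.go, List.isPrefixOf, Ne.symm hc]
        rw [hstep, ih rest _ _ (by simpa using h)]
        rw [hcons_shift c cur.reverse rest hc]
        simp
theorem splitOn_newline (l : List Char) : PySem.Chars.splitOn l ['\n'] = splitNl l := by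
  unfold PySem.Chars.splitOn
  rw [go_eq (l.length + 1) l [] [] (by omega)]
  simp [hcons_nil _ (splitNl_ne_nil l)]

-- both conditions agree: 10 ≤ len already forces nonemptiness
theorem cond_bridge (buf : List Char) :
    (decide (10 ≤ (buf.length : Int)) && (!buf.isEmpty && buf.all PySem.Chars.isdigit))
      = (decide (10 ≤ (buf.length : Int)) && buf.all PySem.Chars.isdigit) := by
  cases buf with
  | nil => simp
  | cons c t => simp

theorem chStep_eq_lineStep (buf : List Char) (mn mr : String) :
    ((if decide (10 ≤ (buf.length : Int)) && buf.all PySem.Chars.isdigit then String.ofList buf else mn),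
     (if buf.any PySem.Chars.isdigit then String.ofList buf else mr))
      = lineStep (mn, mr) (String.ofList buf) := by
  simp only [lineStep, PySem.Str.len, PySem.Str.strIsdigit, PySem.Chars.strIsdigit,
    String.toList_ofList, cond_bridge]

-- the streaming scan, run from any partially read line, equals A's fold over the remaining lines
theorem scan_eq (l : List Char) : ∀ (buf : List Char) (mn mr : String),
    emiFinish (l.foldl emiChStep
        (buf, (buf.length : Int), buf.any PySem.Chars.isdigit, buf.all PySem.Chars.isdigit, mn, mr))
      = (hcons buf (splitNl l)).foldl (fun st cs => lineStep st (String.ofList cs)) (mn, mr) := by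
  induction l with
  | nil =>
    intro buf mn mr
    simp only [List.foldl_nil, splitNl, hcons, List.foldl_cons, List.append_nil, emiFinish]
    exact chStep_eq_lineStep buf mn mr
  | cons c rest ih =>
    intro buf mn mr
    by_cases hc : c = '\n'
    · subst hc
      have hstep : emiChStep (buf, (buf.length : Int), buf.any PySem.Chars.isdigit,
            buf.all PySem.Chars.isdigit, mn, mr) '\n'
          = ([], ((0:Nat) : Int), false, true,
             (if decide (10 ≤ (buf.length : Int)) && buf.all PySem.Chars.isdigit then String.ofList buf else mn),
             (if buf.any PySem.Chars.isdigit then String.ofList buf else mr)) := by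
        simp [emiChStep]
      rw [List.foldl_cons, hstep]
      have := ih ([]) ((if decide (10 ≤ (buf.length : Int)) && buf.all PySem.Chars.isdigit then String.ofList buf else mn))
          ((if buf.any PySem.Chars.isdigit then String.ofList buf else mr))
      simp only [List.length_nil, List.any_nil, List.all_nil] at this
      rw [this, hcons_nil _ (splitNl_ne_nil rest)]
      have hsp : splitNl ('\n' :: rest) = [] :: splitNl rest := by simp [splitNl]
      rw [hsp]
      have hh : hcons buf ([] :: splitNl rest) = buf :: splitNl rest := by simp [hcons]
      rw [hh, List.foldl_cons, chStep_eq_lineStep]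
    · have hstep : emiChStep (buf, (buf.length : Int), buf.any PySem.Chars.isdigit,
            buf.all PySem.Chars.isdigit, mn, mr) c
          = (buf ++ [c], ((buf ++ [c]).length : Int), (buf ++ [c]).any PySem.Chars.isdigit,
             (buf ++ [c]).all PySem.Chars.isdigit, mn, mr) := by
        simp [emiChStep, hc, Bool.or_comm, Bool.and_comm]
      rw [List.foldl_cons, hstep, ih (buf ++ [c]) mn mr, hcons_shift c buf rest hc]

-- ===== VERDICT (by name: the statement is the Claim_ definition above) =====
theorem extract_meter_info_spec : Claim_equal_extract_meter_info := by
  intro text _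
  unfold Spec_extract_meter_info
  rw [extract_eq_foldl]
  have hsplit : PySem.Str.split? text "\n" = some ((splitNl text.toList).map String.ofList) := by
    have hsep : ("\n" : String).toList = ['\n'] := rfl
    simp [PySem.Str.split?, PySem.Chars.split?, hsep, splitOn_newline]
  rw [hsplit]
  simp only [Option.getD_some, List.foldl_map]
  have := scan_eq text.toList [] "" ""
  simp only [List.length_nil, List.any_nil, List.all_nil,
    hcons_nil _ (splitNl_ne_nil text.toList)] at this
  rw [← this]
  rfl
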